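-- pv_equiv track=rewrite | github.com/PatilHiteshB/Competetive | Python/IsItFibonacci/IsItFibonacci.py | solve
-- ===== SOURCE A (Python) =====
-- def solve(N, K, GeekNum):
--     #your code goes here
--     if N <= K:
--         return GeekNum[N-1]
--
--     arr = [0 for _ in range(N)]
--
--     for i in range(K):
--         arr[i] = GeekNum[i]
--
--     su = sum(GeekNum)
--
--     for i in range(K, N):
--
--         arr[i] = su
--         su = 2*arr[i] - arr[i-K]
--
--     return arr[N-1]
-- ===== SOURCE B (Python) =====
-- def solve(N, K, GeekNum):
--     # Simpler: grow the sequence, each new term re-summed from the last K stored values.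
--     if N <= K:
--         return GeekNum[N - 1]
--     seq = list(GeekNum)
--     for _ in range(N - K):
--         seq.append(sum(seq[-K:]))
--     return seq[-1]
-- ===== Notes on version B (the rewrite author's own statement) =====
-- stated objective: simpler
-- what changed: B drops A's preallocated array, index-copy loop and O(1) rolling-sum variable, instead growing one list and re-summing the last K stored values for each new term (O(N*K) window rescan vs A's O(N) incremental update).
-- outside the precondition, e.g. on solve(4, 2, [1, 2, 3]): A returns 11, B returns 8; on solve(2, 0, [3]): A returns 3, B returns 6
import Mathlib
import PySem

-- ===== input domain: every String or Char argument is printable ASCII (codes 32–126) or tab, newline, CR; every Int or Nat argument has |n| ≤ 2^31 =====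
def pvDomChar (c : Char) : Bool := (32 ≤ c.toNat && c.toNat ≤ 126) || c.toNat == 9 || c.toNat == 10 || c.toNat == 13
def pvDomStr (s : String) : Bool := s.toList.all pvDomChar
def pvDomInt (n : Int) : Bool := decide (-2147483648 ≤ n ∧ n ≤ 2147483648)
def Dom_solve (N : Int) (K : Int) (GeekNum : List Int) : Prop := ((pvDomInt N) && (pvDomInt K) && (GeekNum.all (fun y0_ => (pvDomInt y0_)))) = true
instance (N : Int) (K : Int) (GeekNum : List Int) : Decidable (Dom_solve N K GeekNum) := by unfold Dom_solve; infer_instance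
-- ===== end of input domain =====

-- B re-implements A more simply: it grows one list, re-summing the last K stored
-- values for each new term, instead of A's preallocated array + rolling-sum variable.

-- ===== PORT A =====
def solve (N : Int) (K : Int) (GeekNum : List Int) : Int :=
  if N ≤ K then (PySem.List.pyGet? GeekNum (N - 1)).getD 0
  else
    -- arr = [0 for _ in range(N)]
    let arr0 : List Int := (PySem.List.pyRange 0 N 1).map (fun _ => 0)
    -- for i in range(K): arr[i] = GeekNum[i]
    let arr1 := (PySem.List.pyRange 0 K 1).foldl
      (fun a i => a.set i.toNat ((PySem.List.pyGet? GeekNum i).getD 0)) arr0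
    -- su = sum(GeekNum)
    let su0 := GeekNum.sum
    -- for i in range(K, N): arr[i] = su; su = 2*arr[i] - arr[i-K]
    let st := (PySem.List.pyRange K N 1).foldl
      (fun (p : List Int × Int) i =>
        let a := p.1.set i.toNat p.2
        (a, 2 * (PySem.List.pyGet? a i).getD 0 - (PySem.List.pyGet? a (i - K)).getD 0))
      (arr1, su0)
    (PySem.List.pyGet? st.1 (N - 1)).getD 0

-- ===== PORT B =====
def solve_alt (N : Int) (K : Int) (GeekNum : List Int) : Int :=
  if N ≤ K then (PySem.List.pyGet? GeekNum (N - 1)).getD 0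
  else
    -- seq = list(GeekNum); for _ in range(N-K): seq.append(sum(seq[-K:]))
    let seq := (PySem.List.pyRange 0 (N - K) 1).foldl
      (fun s _ => s ++ [(PySem.List.slice s (some (-K)) none).sum]) GeekNum
    (PySem.List.pyGet? seq (-1)).getD 0

-- ===== PRECONDITION & SPEC =====
-- Pre_ admits every N <= K lookup A performs, and for the recurrence branch the problem's
-- natural domain (K a positive count, GeekNum exactly the K seed terms).  It excludes inputs
-- A still returns on only when K < N with len(GeekNum) != K (A's seed sum(GeekNum) leaks the
-- extra entries into every later term) or K < 1 (A's loop writes via negative-index wraparound).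
def Pre_solve (N : Int) (K : Int) (GeekNum : List Int) : Prop :=
  (N ≤ K ∧ PySem.Raise.InRange GeekNum.length (N - 1)) ∨
  (K < N ∧ 1 ≤ K ∧ (GeekNum.length : Int) = K)
instance (N : Int) (K : Int) (GeekNum : List Int) : Decidable (Pre_solve N K GeekNum) := by
  unfold Pre_solve; infer_instance

def pvWitness_solve : Int × Int × List Int := (5, 2, [1, 1])

def Spec_solve (N : Int) (K : Int) (GeekNum : List Int) (out : Int) : Prop := out = solve_alt N K GeekNum
instance (N : Int) (K : Int) (GeekNum : List Int) (out : Int) : Decidable (Spec_solve N K GeekNum out) := by unfold Spec_solve; infer_instance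

-- ===== CLAIM (what is proved, stated in full; the proofs are below) =====
def Claim_equal_solve : Prop := ∀ (N : Int) (K : Int) (GeekNum : List Int), Dom_solve N K GeekNum → Pre_solve N K GeekNum → Spec_solve N K GeekNum (solve N K GeekNum)

-- ===== LEMMAS AND PROOFS =====

-- one window step: append the sum of the last k stored values
def wstep (k : Nat) (s : List Int) : List Int := s ++ [(s.drop (s.length - k)).sum]

lemma length_wstep_iter (k : Nat) (w : List Int) (m : Nat) :
    ((wstep k)^[m] w).length = w.length + m := by
  induction m with
  | zero => simp
  | succ m ih => rw [Function.iterate_succ_apply']; simp [wstep, ih]; omega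

-- B's fold ignores the range elements: it is m-fold iteration of wstep
lemma foldl_const_iter (f : List Int → List Int) (l : List Int) (w : List Int) :
    l.foldl (fun s _ => f s) w = f^[l.length] w := by
  induction l generalizing w with
  | nil => rfl
  | cons x xs ih => simp [List.foldl_cons, ih, Function.iterate_succ_apply]

-- A's copy loop: writing w into the zero prefix yields w ++ tail
lemma copy_loop (w : List Int) (tail : List Int) :
    ∀ (r j : Nat), j + r = w.length →
      (PySem.List.pyRange (j : Int) (w.length : Int) 1).foldl
        (fun a i => a.set i.toNat ((PySem.List.pyGet? w i).getD 0))
        (w.take j ++ List.replicate r 0 ++ tail) = w ++ tail := by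
  intro r
  induction r with
  | zero =>
    intro j hj
    have hjw : j = w.length := by omega
    subst hjw
    rw [PySem.List.pyRange_one_eq_nil (le_refl _)]
    simp only [List.foldl_nil, List.replicate_zero, List.append_nil, List.take_length]
  | succ r ih =>
    intro j hj
    have hjlt : j < w.length := by omega
    rw [PySem.List.pyRange_one_cons (by exact_mod_cast hjlt)]
    simp only [List.foldl_cons]
    have hget : (PySem.List.pyGet? w (j : Int)).getD 0 = w[j] := by
      simp [PySem.List.pyGet?_natCast, List.getElem?_eq_getElem hjlt]
    have hlen : (w.take j).length = j := by simp; omega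
    have hset :
        ((w.take j ++ List.replicate (r + 1) 0 ++ tail).set ((j : Int)).toNat
          ((PySem.List.pyGet? w (j : Int)).getD 0))
        = w.take (j + 1) ++ List.replicate r 0 ++ tail := by
      rw [hget, show ((j : Int)).toNat = j by omega, List.append_assoc,
          List.set_append_right _ _ (by omega : (w.take j).length ≤ j), hlen, Nat.sub_self,
          List.replicate_succ, List.cons_append, List.set_cons_zero,
          List.take_succ_eq_append_getElem hjlt]
      simp only [List.append_assoc, List.singleton_append]
      rfl
    rw [hset]
    have := ih (j + 1) (by omega)
    rw [show ((j : Int) + 1) = ((j + 1 : Nat) : Int) by omega]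
    exact this

-- A's main loop invariant: after m of M iterations the array is (wstep^[m] w) padded
-- with zeros and the rolling sum is the sum of the last k stored values.
lemma main_loop (k : Nat) (hk : 1 ≤ k) (w : List Int) (hw : w.length = k) (M : Nat) :
    ∀ (r m : Nat), m + r = M →
      (PySem.List.pyRange ((k : Int) + m) ((k : Int) + M) 1).foldl
        (fun (p : List Int × Int) i =>
          let a := p.1.set i.toNat p.2
          (a, 2 * (PySem.List.pyGet? a i).getD 0 - (PySem.List.pyGet? a (i - k)).getD 0))
        ((wstep k)^[m] w ++ List.replicate r 0, (((wstep k)^[m] w).drop m).sum)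
      = ((wstep k)^[M] w, (((wstep k)^[M] w).drop M).sum) := by
  intro r
  induction r with
  | zero =>
    intro m hm
    have hmM : m = M := by omega
    subst hmM
    rw [PySem.List.pyRange_one_eq_nil (le_refl _)]
    simp only [List.foldl_nil, List.replicate_zero, List.append_nil]
  | succ r ih =>
    intro m hm
    rw [PySem.List.pyRange_one_cons (by omega)]
    simp only [List.foldl_cons]
    set g := (wstep k)^[m] w with hg
    have hlg : g.length = k + m := by rw [hg, length_wstep_iter, hw]
    have hmlt : m < g.length := by omega
    set su := (g.drop m).sum with hsu
    -- the array write appends su after g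
    have htoNat : ((k : Int) + (m : Nat)).toNat = k + m := by omega
    have hset : (g ++ List.replicate (r + 1) 0).set ((k : Int) + m).toNat su
        = (g ++ [su]) ++ List.replicate r 0 := by
      rw [htoNat, List.replicate_succ,
          List.set_append_right _ _ (by omega : g.length ≤ k + m), hlg]
      simp
    rw [hset]
    have hstep : (wstep k)^[m + 1] w = g ++ [su] := by
      rw [Function.iterate_succ_apply', ← hg, wstep, hsu, hlg]
      simp
    -- arr[i] = su  (just written)
    have hgi : (PySem.List.pyGet? ((g ++ [su]) ++ List.replicate r 0) ((k : Int) + m)).getD 0 = su := by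
      rw [show ((k : Int) + m) = (((k + m : Nat)) : Int) by omega]
      rw [PySem.List.pyGet?_natCast]
      rw [List.getElem?_append_left (by simp [hlg])]
      rw [List.getElem?_append_right (by omega : g.length ≤ k + m)]
      simp [hlg]
    -- arr[i-k] = g[m]
    have hgik : (PySem.List.pyGet? ((g ++ [su]) ++ List.replicate r 0) ((k : Int) + m - k)).getD 0 = g[m] := by
      rw [show ((k : Int) + m - k) = ((m : Nat) : Int) by omega]
      rw [PySem.List.pyGet?_natCast]
      rw [List.getElem?_append_left (by simp [hlg])]
      rw [List.getElem?_append_left hmlt]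
      simp [List.getElem?_eq_getElem hmlt]
    rw [hgi, hgik]
    -- the new rolling sum is the sum of the last k values of g ++ [su]
    have hsu' : 2 * su - g[m] = (((wstep k)^[m + 1] w).drop (m + 1)).sum := by
      rw [hstep, List.drop_append_of_le_length (by omega), List.sum_append]
      have : g.drop m = g[m] :: g.drop (m + 1) := List.drop_eq_getElem_cons hmlt
      have hsum : su = g[m] + (g.drop (m + 1)).sum := by rw [hsu, this, List.sum_cons]
      simp [hsum]; ring
    rw [hsu', ← hstep,
        show ((k : Int) + m + 1) = ((k : Int) + ((m + 1 : Nat) : Int)) by omega]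
    exact ih (m + 1) (by omega)

-- ===== VERDICT (by name: the statement is the Claim_ definition above) =====
theorem solve_spec : Claim_equal_solve := by
  intro N K GeekNum _hdom hpre
  unfold Spec_solve solve solve_alt
  rcases hpre with ⟨hNK, _⟩ | ⟨hKN, hK, hlen⟩
  · simp [hNK]
  · have hNK : ¬ N ≤ K := by omega
    have hN : 1 ≤ N := by omega
    simp only [if_neg hNK]
    set k := K.toNat with hkdef
    have hKk : K = (k : Int) := by omega
    have hk1 : 1 ≤ k := by omega
    have hwlen : GeekNum.length = k := by omega
    set M := (N - K).toNat with hMdef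
    have hM1 : 1 ≤ M := by omega
    have hNkM : N = (k : Int) + (M : Int) := by omega
    -- B's side: the fold is M-fold iteration of wstep
    have hBstep : (fun (s : List Int) (_ : Int) => s ++ [(PySem.List.slice s (some (-K)) none).sum])
        = fun s _ => wstep k s := by
      funext s i
      rw [wstep, hKk, PySem.List.slice_from_neg_natCast s k hk1]
    have hB : (PySem.List.pyRange 0 (N - K) 1).foldl
        (fun s _ => s ++ [(PySem.List.slice s (some (-K)) none).sum]) GeekNum
        = (wstep k)^[M] GeekNum := by
      rw [hBstep, foldl_const_iter, PySem.List.length_pyRange_one]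
      simp [hMdef]
    -- A's side
    have hA0 : (PySem.List.pyRange 0 N 1).map (fun _ => (0 : Int))
        = List.replicate N.toNat 0 := by
      rw [PySem.List.pyRange_one, List.map_map]
      simp [List.eq_replicate_iff]
    have hA1 : (PySem.List.pyRange 0 K 1).foldl
        (fun a i => a.set i.toNat ((PySem.List.pyGet? GeekNum i).getD 0))
        (List.replicate N.toNat 0) = GeekNum ++ List.replicate M 0 := by
      have := copy_loop GeekNum (List.replicate M 0) (GeekNum.length) 0 (by omega)
      simp only [List.take_zero, List.nil_append, Nat.cast_zero] at this
      rw [show (K : Int) = (GeekNum.length : Int) by omega]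
      rw [show List.replicate N.toNat (0 : Int)
            = List.replicate GeekNum.length 0 ++ List.replicate M 0 by
        rw [← List.replicate_add]; congr 1; omega]
      exact this
    have hmain := main_loop k hk1 GeekNum hwlen M M 0 (by omega)
    simp only [Function.iterate_zero_apply, Nat.cast_zero, add_zero, List.drop_zero] at hmain
    rw [hA0, hA1, hB]
    rw [show (PySem.List.pyRange K N 1) = PySem.List.pyRange (k : Int) ((k : Int) + (M : Int)) 1 by
      rw [hKk, hNkM]]
    rw [hKk, hmain]
    -- both return the last element of (wstep^[M] GeekNum)
    have hglen : ((wstep k)^[M] GeekNum).length = k + M := by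
      rw [length_wstep_iter, hwlen]
    rw [PySem.List.pyGet?_neg_one]
    rw [show N - 1 = ((k + M - 1 : Nat) : Int) by omega]
    rw [PySem.List.pyGet?_natCast]
    rw [List.getLast?_eq_getElem?, hglen]
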